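-- pv_equiv track=rewrite | github.com/Jar-Jar-Binks/PE | pe_002.py | find_fibonacci_sum
-- ===== SOURCE A (Python) =====
-- def find_fibonacci_sum(limit, option=0):
--     # find sum of terms in Fibonacci sequence whose values do not exceed limit
--     # option = 0: find sum of all Fibonacci terms <= limit
--     # option = 1: find sum of all even Fibonacci terms <= limit
--     # option = 2: find sum of all odd Fibonacci terms <= limit
--     numbers = [1, 2]
--     test_value = numbers[-1] + numbers[-2]
--     while test_value <= limit:
--         numbers.append(test_value)
--         test_value = numbers[-1] + numbers[-2]
--
--     if option in [1, 2]:
--         return sum([x for x in numbers if x % 2 == (option - 1)])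
--     return sum(numbers)
-- ===== SOURCE B (Python) =====
-- def find_fibonacci_sum(limit, option=0):
--     # Advance the Fibonacci pair to the end and get the total from the
--     # telescoping identity sum(terms) = prev + 2*cur - 2 (no accumulation,
--     # no stored list); even terms come from the every-third-term recurrence
--     # E_k = 4*E_{k-1} + E_{k-2} (2, 8, 34, ...), odd = total - even.
--     prev, cur = 1, 2
--     while prev + cur <= limit:
--         prev, cur = cur, prev + cur
--     total = prev + 2 * cur - 2
--     if option not in (1, 2):
--         return total
--     even = 2
--     ep, ec = 2, 8
--     while ec <= limit:
--         even += ec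
--         ep, ec = ec, 4 * ec + ep
--     return even if option == 1 else total - even
-- ===== Notes on version B (the rewrite author's own statement) =====
-- stated objective: alternative
-- what changed: B never stores or filters a list: the total comes from the telescoping identity sum = prev + 2*cur - 2 after advancing only the last Fibonacci pair, the even sum from the every-third-term recurrence E_k = 4*E_{k-1} + E_{k-2} (visiting only even terms), and the odd sum as total - even.
import Mathlib
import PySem

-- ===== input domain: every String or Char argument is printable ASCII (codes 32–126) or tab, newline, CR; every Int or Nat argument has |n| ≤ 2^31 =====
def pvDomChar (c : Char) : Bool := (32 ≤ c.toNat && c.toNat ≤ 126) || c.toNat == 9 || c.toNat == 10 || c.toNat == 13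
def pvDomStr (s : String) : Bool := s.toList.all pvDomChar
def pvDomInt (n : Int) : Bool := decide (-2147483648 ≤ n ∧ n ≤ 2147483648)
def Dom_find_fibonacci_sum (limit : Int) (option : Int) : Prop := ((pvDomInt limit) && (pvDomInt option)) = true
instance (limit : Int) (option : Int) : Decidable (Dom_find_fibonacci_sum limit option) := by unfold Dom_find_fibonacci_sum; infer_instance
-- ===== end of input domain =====

-- B replaces A's stored list + parity filtering by closed-form identities: total = prev + 2*cur - 2 from the final pair, evens via E_k = 4*E_{k-1} + E_{k-2}, odd = total - even (alternative algorithm, O(1) space).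


-- ===== PORT A =====
-- A's while loop: append numbers[-1]+numbers[-2] while it is <= limit.
-- Fuel limit.toNat is a totality guard only (each appended value is a distinct integer in [3, limit], so at most limit-2 iterations happen).
def fibLoopA (fuel : Nat) (limit : Int) (numbers : List Int) : List Int :=
  match fuel with
  | 0 => numbers
  | f + 1 =>
    let test_value := PySem.List.pyGetD numbers (-1) 0 + PySem.List.pyGetD numbers (-2) 0
    if test_value ≤ limit then fibLoopA f limit (numbers ++ [test_value]) else numbers

def find_fibonacci_sum (limit : Int) (option : Int) : Int :=
  let numbers := fibLoopA limit.toNat limit [1, 2]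
  if option = 1 ∨ option = 2 then
    (numbers.filter (fun x => PySem.Int.mod x 2 = option - 1)).sum
  else numbers.sum

-- ===== PORT B =====
-- B's first while loop: advance only the last Fibonacci pair (no list, no total).
def pairLoopB (fuel : Nat) (limit : Int) (prev cur : Int) : Int × Int :=
  match fuel with
  | 0 => (prev, cur)
  | f + 1 => if prev + cur ≤ limit then pairLoopB f limit cur (prev + cur) else (prev, cur)

-- B's second while loop: only the even terms, via E_k = 4*E_{k-1} + E_{k-2}.
def evenLoopB (fuel : Nat) (limit : Int) (ep ec even : Int) : Int :=
  match fuel with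
  | 0 => even
  | f + 1 => if ec ≤ limit then evenLoopB f limit ec (4 * ec + ep) (even + ec) else even

def find_fibonacci_sum_alt (limit : Int) (option : Int) : Int :=
  let pc := pairLoopB limit.toNat limit 1 2
  let total := pc.1 + 2 * pc.2 - 2
  if ¬(option = 1 ∨ option = 2) then total
  else
    let even := evenLoopB limit.toNat limit 2 8 2
    if option = 1 then even else total - even

-- ===== PRECONDITION & SPEC =====
def Spec_find_fibonacci_sum (limit : Int) (option : Int) (out : Int) : Prop := out = find_fibonacci_sum_alt limit option
instance (limit : Int) (option : Int) (out : Int) : Decidable (Spec_find_fibonacci_sum limit option out) := by unfold Spec_find_fibonacci_sum; infer_instance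

-- ===== CLAIM (what is proved, stated in full; the proofs are below) =====
def Claim_equal_find_fibonacci_sum : Prop := ∀ (limit : Int) (option : Int), Dom_find_fibonacci_sum limit option → Spec_find_fibonacci_sum limit option (find_fibonacci_sum limit option)

-- ===== LEMMAS AND PROOFS =====

-- Python mod with modulus 2 is Lean's emod (so omega can reason about parity).
theorem mod2 (x : Int) : PySem.Int.mod x 2 = x % 2 :=
  PySem.Int.mod_eq_emod_of_pos (by norm_num)

-- numbers[-1] and numbers[-2] of a list ending in [a, b].
theorem getD_last (l : List Int) (a b : Int) :
    PySem.List.pyGetD (l ++ [a, b]) (-1) 0 = b ∧ PySem.List.pyGetD (l ++ [a, b]) (-2) 0 = a := by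
  constructor
  · have he : l ++ [a, b] = (l ++ [a]) ++ [b] := by simp
    rw [he, PySem.List.pyGetD_neg_one_append_singleton]
  · have hlen : (2 : Nat) ≤ (l ++ [a, b]).length := by simp
    rw [PySem.List.pyGetD_neg_ofNat _ 2 0 (by omega) hlen]
    simp

-- One unfolding of fibLoopA at a list ending in [a, b].
theorem fibLoopA_succ (f : Nat) (limit : Int) (l : List Int) (a b : Int) :
    fibLoopA (f + 1) limit (l ++ [a, b])
      = if b + a ≤ limit then fibLoopA f limit ((l ++ [a, b]) ++ [b + a]) else l ++ [a, b] := by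
  have h := getD_last l a b
  simp only [fibLoopA, h.1, h.2]

-- Fuel stability: once the fuel exceeds limit+1-(prev+cur), one more unit changes nothing.
theorem fibLoopA_stable (limit : Int) :
    ∀ (f : Nat) (pre : List Int) (prev cur : Int), 1 ≤ prev → prev ≤ cur →
      (limit + 1 - (prev + cur)).toNat ≤ f →
      fibLoopA (f + 1) limit (pre ++ [prev, cur]) = fibLoopA f limit (pre ++ [prev, cur]) := by
  intro f
  induction f with
  | zero =>
    intro pre prev cur h1 h2 hf
    rw [fibLoopA_succ, if_neg (by omega)]
    rfl
  | succ f ih =>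
    intro pre prev cur h1 h2 hf
    rw [fibLoopA_succ, fibLoopA_succ]
    by_cases hc : cur + prev ≤ limit
    · rw [if_pos hc, if_pos hc]
      have he : (pre ++ [prev, cur]) ++ [cur + prev] = (pre ++ [prev]) ++ [cur, cur + prev] := by simp
      rw [he]
      exact ih (pre ++ [prev]) cur (cur + prev) (by omega) (by omega) (by omega)
    · rw [if_neg hc, if_neg hc]

-- Hence any extra fuel beyond the stability threshold is irrelevant.
theorem fibLoopA_add_fuel (limit : Int) (k : Nat) :
    ∀ (f : Nat) (pre : List Int) (prev cur : Int), 1 ≤ prev → prev ≤ cur →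
      (limit + 1 - (prev + cur)).toNat ≤ f →
      fibLoopA (f + k) limit (pre ++ [prev, cur]) = fibLoopA f limit (pre ++ [prev, cur]) := by
  induction k with
  | zero => intro f pre prev cur _ _ _; rfl
  | succ k ih =>
    intro f pre prev cur h1 h2 hf
    have : f + (k + 1) = (f + k) + 1 := by omega
    rw [this, fibLoopA_stable limit (f + k) pre prev cur h1 h2 (by omega)]
    exact ih f pre prev cur h1 h2 hf

-- Telescoping invariant for the total: appending nxt = prev+cur raises (prev + 2*cur) by exactly nxt,
-- so the list sum is recovered from the final pair of pairLoopB (same fuel, same steps).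
theorem pair_invariant (limit : Int) :
    ∀ (f : Nat) (pre : List Int) (prev cur : Int),
      (fibLoopA f limit (pre ++ [prev, cur])).sum
        = (pre ++ [prev, cur]).sum - (prev + 2 * cur)
          + ((pairLoopB f limit prev cur).1 + 2 * (pairLoopB f limit prev cur).2) := by
  intro f
  induction f with
  | zero => intro pre prev cur; simp [fibLoopA, pairLoopB]
  | succ f ih =>
    intro pre prev cur
    rw [fibLoopA_succ]
    simp only [pairLoopB]
    by_cases hc : prev + cur ≤ limit
    · rw [if_pos (by omega : cur + prev ≤ limit), if_pos hc]
      have he : (pre ++ [prev, cur]) ++ [cur + prev] = (pre ++ [prev]) ++ [cur, cur + prev] := by simp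
      rw [he]
      have := ih (pre ++ [prev]) cur (cur + prev)
      rw [this]
      have hcp : cur + prev = prev + cur := by ring
      rw [hcp]
      simp [List.sum_append]
      ring
    · rw [if_neg (by omega : ¬ cur + prev ≤ limit), if_neg hc]
      ring

-- Chunk invariant for the even sum: from a state (o odd, e even) at the end of the list,
-- A appends o+e (odd), o+2e (odd), 2o+3e (even) per chunk of three steps, while evenLoopB
-- takes one step with ep = e, ec = 2o+3e; fuel is aligned exactly as 3*f vs f.
theorem even_invariant (limit : Int) :
    ∀ (f : Nat) (pre : List Int) (o e acc : Int), 1 ≤ o → 1 ≤ e →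
      PySem.Int.mod o 2 = 1 → PySem.Int.mod e 2 = 0 →
      ((pre ++ [o, e]).filter (fun x => PySem.Int.mod x 2 = 0)).sum = acc →
      ((fibLoopA (3 * f) limit (pre ++ [o, e])).filter (fun x => PySem.Int.mod x 2 = 0)).sum
        = evenLoopB f limit e (2 * o + 3 * e) acc := by
  intro f
  induction f with
  | zero => intro pre o e acc _ _ _ _ hacc; simpa [fibLoopA, evenLoopB] using hacc
  | succ f ih =>
    intro pre o e acc h1 h2 ho he hacc
    rw [mod2] at ho he
    have h3 : 3 * (f + 1) = (3 * f + 2) + 1 := by omega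
    rw [h3, fibLoopA_succ]
    simp only [evenLoopB]
    by_cases hc3 : 2 * o + 3 * e ≤ limit
    · -- full chunk: three appends on the A side, one step on the B side
      rw [if_pos (by omega : e + o ≤ limit), if_pos hc3]
      have e1 : (pre ++ [o, e]) ++ [e + o] = (pre ++ [o]) ++ [e, e + o] := by simp
      have h4 : 3 * f + 2 = (3 * f + 1) + 1 := by omega
      rw [e1, h4, fibLoopA_succ, if_pos (by omega : (e + o) + e ≤ limit)]
      have e2 : ((pre ++ [o]) ++ [e, e + o]) ++ [(e + o) + e] = (pre ++ [o, e]) ++ [e + o, (e + o) + e] := by simp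
      rw [e2, (by omega : 3 * f + 1 = 3 * f + 1), fibLoopA_succ,
          if_pos (by omega : ((e + o) + e) + (e + o) ≤ limit)]
      have e3 : ((pre ++ [o, e]) ++ [e + o, (e + o) + e]) ++ [((e + o) + e) + (e + o)]
          = (pre ++ [o, e, e + o]) ++ [o + 2 * e, 2 * o + 3 * e] := by
        simp; constructor <;> ring
      rw [e3]
      have := ih (pre ++ [o, e, e + o]) (o + 2 * e) (2 * o + 3 * e) (acc + (2 * o + 3 * e))
        (by omega) (by omega) (by rw [mod2]; omega) (by rw [mod2]; omega)
        (by
          have e4 : (pre ++ [o, e, e + o]) ++ [o + 2 * e, 2 * o + 3 * e]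
              = (pre ++ [o, e]) ++ [e + o, o + 2 * e, 2 * o + 3 * e] := by simp
          rw [e4, List.filter_append, List.sum_append, hacc]
          have d1 : ¬ ((2:Int) ∣ (e + o)) := by omega
          have d2 : ¬ ((2:Int) ∣ (o + 2 * e)) := by omega
          have d3 : ((2:Int) ∣ (2 * o + 3 * e)) := by omega
          simp [d1, d2, d3])
      rw [this]
      have e5 : 4 * (2 * o + 3 * e) + e = 2 * (o + 2 * e) + 3 * (2 * o + 3 * e) := by ring
      rw [e5]
    · -- partial chunk: B stops; A may append at most two odd terms, the even sum is unchanged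
      rw [if_neg hc3]
      by_cases hc1 : e + o ≤ limit
      · rw [if_pos hc1]
        have e1 : (pre ++ [o, e]) ++ [e + o] = (pre ++ [o]) ++ [e, e + o] := by simp
        have h4 : 3 * f + 2 = (3 * f + 1) + 1 := by omega
        rw [e1, h4, fibLoopA_succ]
        by_cases hc2 : (e + o) + e ≤ limit
        · rw [if_pos hc2]
          have e2 : ((pre ++ [o]) ++ [e, e + o]) ++ [(e + o) + e] = (pre ++ [o, e]) ++ [e + o, (e + o) + e] := by simp
          have h5 : 3 * f + 1 = (3 * f) + 1 := rfl
          rw [e2, h5, fibLoopA_succ, if_neg (by omega : ¬ ((e + o) + e) + (e + o) ≤ limit)]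
          have d1 : ¬ ((2:Int) ∣ (e + o)) := by omega
          have d2 : ¬ ((2:Int) ∣ ((e + o) + e)) := by omega
          rw [List.filter_append, List.sum_append, hacc]
          simp [d1, d2]
        · rw [if_neg hc2]
          have d1 : ¬ ((2:Int) ∣ (e + o)) := by omega
          have e2 : (pre ++ [o]) ++ [e, e + o] = (pre ++ [o, e]) ++ [e + o] := by simp
          rw [e2, List.filter_append, List.sum_append, hacc]
          simp [d1]
      · rw [if_neg hc1]
        exact hacc

-- Odd sum = total sum - even sum (Python's x % 2 with positive modulus is 0 or 1).
theorem odd_eq_sum_sub_even (l : List Int) :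
    (l.filter (fun x => PySem.Int.mod x 2 = 1)).sum
      = l.sum - (l.filter (fun x => PySem.Int.mod x 2 = 0)).sum := by
  induction l with
  | nil => simp
  | cons x l ih =>
    by_cases hx : (2:Int) ∣ x
    · have h1 : ¬ (x % 2 = 1) := by omega
      simp at ih
      simp [hx, h1]
      omega
    · have h1 : x % 2 = 1 := by omega
      simp at ih
      simp [hx, h1]
      omega

-- The two fuels used at the top: fibLoopA with fuel limit.toNat equals it with fuel 3*limit.toNat.
theorem fuel_3x (limit : Int) :
    fibLoopA (3 * limit.toNat) limit [1, 2] = fibLoopA limit.toNat limit [1, 2] := by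
  have h : ([1, 2] : List Int) = [] ++ [1, 2] := by simp
  rw [h]
  have := fibLoopA_add_fuel limit (2 * limit.toNat) limit.toNat [] 1 2 (by omega) (by omega) (by omega)
  rw [← this]
  congr 1
  omega

theorem main_eq (limit option : Int) :
    find_fibonacci_sum limit option = find_fibonacci_sum_alt limit option := by
  have hpair := pair_invariant limit limit.toNat [] 1 2
  simp only [List.nil_append] at hpair
  have hsum : (fibLoopA limit.toNat limit [1, 2]).sum
      = (pairLoopB limit.toNat limit 1 2).1 + 2 * (pairLoopB limit.toNat limit 1 2).2 - 2 := by
    rw [hpair]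
    have h3 : ([1, 2] : List Int).sum = 3 := by decide
    rw [h3]
    ring
  have heven := even_invariant limit limit.toNat [] 1 2 2 (by norm_num) (by norm_num)
    (by rw [mod2]; decide) (by rw [mod2]; decide) (by decide)
  simp only [List.nil_append] at heven
  rw [fuel_3x] at heven
  have h8 : (2 * 1 + 3 * 2 : Int) = 8 := by norm_num
  rw [h8] at heven
  simp only [find_fibonacci_sum, find_fibonacci_sum_alt]
  by_cases h1 : option = 1
  · subst h1
    rw [if_pos (Or.inl rfl)]
    rw [if_neg (show ¬¬((1:Int) = 1 ∨ (1:Int) = 2) by simp)]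
    rw [if_pos rfl]
    simp only [show (1:Int) - 1 = 0 by norm_num]
    exact heven
  · by_cases h2 : option = 2
    · subst h2
      rw [if_pos (Or.inr rfl)]
      rw [if_neg (show ¬¬((2:Int) = 1 ∨ (2:Int) = 2) by simp)]
      rw [if_neg (show ¬ (2:Int) = 1 by norm_num)]
      simp only [show (2:Int) - 1 = 1 by norm_num]
      rw [odd_eq_sum_sub_even, hsum, heven]
    · rw [if_neg (by tauto), if_pos (by tauto)]
      exact hsum

-- ===== VERDICT (by name: the statement is the Claim_ definition above) =====
theorem find_fibonacci_sum_spec : Claim_equal_find_fibonacci_sum := by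
  intro limit option _
  unfold Spec_find_fibonacci_sum
  exact main_eq limit option
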